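-- pv_equiv track=rewrite | github.com/jonasrenault/advent2020 | advent2020/day06.py | group_all_questions
-- ===== SOURCE A (Python) =====
-- def group_all_questions(lines: list[str]) -> list[set[str]]:
--     qs = []
--     q = None
--     for line in lines:
--         if not line:
--             qs.append(q)
--             q = None
--         else:
--             if q is None:
--                 q = set(line)
--             else:
--                 q = q.intersection(set(line))
--     qs.append(q)
--     return qs
-- ===== SOURCE B (Python) =====
-- def group_all_questions(lines: list[str]) -> list[set[str]]:
--     groups = [[]]
--     for line in lines:
--         if line:
--             groups[-1].append(line)
--         else:
--             groups.append([])
--     return [set.intersection(*map(set, g)) if g else None for g in groups]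
-- ===== Notes on version B (the rewrite author's own statement) =====
-- stated objective: alternative
-- what changed: B first splits the lines into groups with one grouping pass, then maps a single variadic set.intersection over each group, instead of A's inline running-intersection state machine.
-- outside the precondition, e.g. on group_all_questions(['ab', '', '', 'b']): A returns [{'b', 'a'}, None, {'b'}], B returns [{'b', 'a'}, None, {'b'}]
import Mathlib
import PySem

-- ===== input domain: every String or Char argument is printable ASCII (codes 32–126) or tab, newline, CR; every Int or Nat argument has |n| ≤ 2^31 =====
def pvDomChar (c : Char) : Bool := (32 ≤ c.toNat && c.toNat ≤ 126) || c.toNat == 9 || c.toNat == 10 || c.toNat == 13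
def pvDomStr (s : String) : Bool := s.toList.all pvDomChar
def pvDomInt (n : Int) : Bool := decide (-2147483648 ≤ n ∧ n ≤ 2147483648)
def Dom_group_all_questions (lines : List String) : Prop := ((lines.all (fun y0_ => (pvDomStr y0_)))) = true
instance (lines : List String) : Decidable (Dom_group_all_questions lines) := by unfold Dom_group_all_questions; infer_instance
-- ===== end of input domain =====

-- B replaces A's inline running-intersection state machine by a grouping pass followed by a
-- separate per-group variadic intersection map (alternative decomposition, same cost).


-- ===== PORT A =====
-- set(line): the set of single-character strings of line (Python iterates a str by characters)
def pySetOfStr (line : String) : PySem.Set String :=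
  PySem.Set.ofList (line.toList.map (fun c => String.ofList [c]))

-- Python's q is None or a set; the final list holds sets except for empty groups, where Python
-- appends None (not a set[str]); those inputs are outside Pre_ and None is ported as [].
def group_all_questions (lines : List String) : List (List String) :=
  let st := lines.foldl
    (fun (st : List (List String) × Option (PySem.Set String)) line =>
      if line = "" then
        (st.1 ++ [(st.2).getD []], none)
      else
        match st.2 with
        | none => (st.1, some (pySetOfStr line))
        | some q => (st.1, some (PySem.Set.inter q (pySetOfStr line))))
    ([], none)
  st.1 ++ [(st.2).getD []]

-- ===== PORT B =====
def group_all_questions_alt (lines : List String) : List (List String) :=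
  let groups := lines.foldl
    (fun (gs : List (List String)) line =>
      if line = "" then gs ++ [[]]
      else gs.dropLast ++ [gs.getLastD [] ++ [line]])
    [[]]
  -- set.intersection(*map(set, g)) if g else None   (None, outside Pre_, ported as [])
  groups.map (fun g =>
    match g with
    | [] => ([] : List String)
    | l :: ls => ls.foldl (fun acc m => PySem.Set.inter acc (pySetOfStr m)) (pySetOfStr l))

-- ===== PRECONDITION & SPEC =====
-- Pre_ excludes inputs with an empty group (empty input, a leading/trailing blank line, or two
-- consecutive blank lines): there Python A returns None entries, which are not values of the
-- declared set[str] type (B returns the same None entries).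
def Pre_group_all_questions (lines : List String) : Prop :=
  lines ≠ [] ∧ lines.head? ≠ some "" ∧ lines.getLast? ≠ some "" ∧
  ((lines.zip lines.tail).all (fun p => p.1 ≠ "" ∨ p.2 ≠ "")) = true
instance (lines : List String) : Decidable (Pre_group_all_questions lines) := by
  unfold Pre_group_all_questions; infer_instance

def pvWitness_group_all_questions : List String := ["abc", "bcd", "", "xy"]

def Spec_group_all_questions (lines : List String) (out : List (List String)) : Prop := out = group_all_questions_alt lines
instance (lines : List String) (out : List (List String)) : Decidable (Spec_group_all_questions lines out) := by unfold Spec_group_all_questions; infer_instance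

-- ===== CLAIM (what is proved, stated in full; the proofs are below) =====
def Claim_equal_group_all_questions : Prop := ∀ (lines : List String), Dom_group_all_questions lines → Pre_group_all_questions lines → Spec_group_all_questions lines (group_all_questions lines)

-- ===== LEMMAS AND PROOFS =====

-- proof-side names for the two loop bodies and for B's per-group intersection
def stepA (st : List (List String) × Option (PySem.Set String)) (line : String) :
    List (List String) × Option (PySem.Set String) :=
  if line = "" then
    (st.1 ++ [(st.2).getD []], none)
  else
    match st.2 with
    | none => (st.1, some (pySetOfStr line))
    | some q => (st.1, some (PySem.Set.inter q (pySetOfStr line)))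

def stepB (gs : List (List String)) (line : String) : List (List String) :=
  if line = "" then gs ++ [[]]
  else gs.dropLast ++ [gs.getLastD [] ++ [line]]

def intOf (g : List String) : List String :=
  match g with
  | [] => []
  | l :: ls => ls.foldl (fun acc m => PySem.Set.inter acc (pySetOfStr m)) (pySetOfStr l)

def optInt (g : List String) : Option (PySem.Set String) :=
  match g with
  | [] => none
  | l :: ls => some (ls.foldl (fun acc m => PySem.Set.inter acc (pySetOfStr m)) (pySetOfStr l))

lemma optInt_getD (g : List String) : (optInt g).getD [] = intOf g := by
  cases g <;> rfl

lemma stepB_concat (done : List (List String)) (cur : List String) (line : String) :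
    stepB (done ++ [cur]) line =
      if line = "" then done ++ [cur] ++ [[]] else done ++ [cur ++ [line]] := by
  unfold stepB
  split_ifs with h
  · rfl
  · simp

lemma optInt_concat (cur : List String) (line : String) :
    optInt (cur ++ [line]) =
      some (match optInt cur with
            | none => pySetOfStr line
            | some q => PySem.Set.inter q (pySetOfStr line)) := by
  cases cur with
  | nil => rfl
  | cons l ls => simp [optInt, List.foldl_append]

lemma main_invariant (lines : List String) :
    ∀ (done : List (List String)) (cur : List String),
      (let st := lines.foldl stepA (done.map intOf, optInt cur)
       st.1 ++ [(st.2).getD []]) =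
      (lines.foldl stepB (done ++ [cur])).map intOf := by
  induction lines with
  | nil =>
      intro done cur
      simp [optInt_getD]
  | cons line rest ih =>
      intro done cur
      by_cases h : line = ""
      · subst h
        have h1 : stepA (done.map intOf, optInt cur) "" =
            ((done ++ [cur]).map intOf, optInt ([] : List String)) := by
          unfold stepA
          rw [if_pos rfl]
          rw [show ((optInt cur).getD [] : List String) = intOf cur from optInt_getD cur]
          simp [optInt]
        calc (let st := (("" :: rest).foldl stepA (done.map intOf, optInt cur))
              st.1 ++ [(st.2).getD []])
            = (let st := rest.foldl stepA ((done ++ [cur]).map intOf, optInt ([] : List String))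
               st.1 ++ [(st.2).getD []]) := by rw [List.foldl_cons, h1]
          _ = (rest.foldl stepB ((done ++ [cur]) ++ [[]])).map intOf := ih (done ++ [cur]) []
          _ = (("" :: rest).foldl stepB (done ++ [cur])).map intOf := by
                rw [List.foldl_cons, stepB_concat, if_pos rfl]
      · have h1 : stepA (done.map intOf, optInt cur) line =
            (done.map intOf, optInt (cur ++ [line])) := by
          unfold stepA
          rw [if_neg h, optInt_concat]
          cases hc : optInt cur <;> simp
        calc (let st := ((line :: rest).foldl stepA (done.map intOf, optInt cur))
              st.1 ++ [(st.2).getD []])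
            = (let st := rest.foldl stepA (done.map intOf, optInt (cur ++ [line]))
               st.1 ++ [(st.2).getD []]) := by rw [List.foldl_cons, h1]
          _ = (rest.foldl stepB (done ++ [cur ++ [line]])).map intOf := ih done (cur ++ [line])
          _ = ((line :: rest).foldl stepB (done ++ [cur])).map intOf := by
                rw [List.foldl_cons, stepB_concat, if_neg h]

lemma ports_agree (lines : List String) :
    group_all_questions lines = group_all_questions_alt lines := by
  have h := main_invariant lines [] []
  simp only [List.map_nil, List.nil_append] at h
  exact h

-- ===== VERDICT (by name: the statement is the Claim_ definition above) =====
theorem group_all_questions_spec : Claim_equal_group_all_questions := by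
  intro lines _ _
  unfold Spec_group_all_questions
  exact ports_agree lines
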